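-- pv_equiv track=rewrite | github.com/sparsh-m/30days | d9_6.py | helper
-- ===== SOURCE A (Python) =====
-- def helper(s,wordDict,string,visited):
-- 	if string==s:
-- 		return True
-- 	for i in range(len(wordDict)):
-- 		if i not in visited:
-- 			visited.add(i)
-- 			if helper(s,wordDict,string+wordDict[i],visited):
-- 				return True
-- 			visited.remove(i)
-- 	return False
-- ===== SOURCE B (Python) =====
-- def picks(l):
--     # all ways to pick one element: (l[k], l with position k removed)
--     return [(l[k], l[:k] + l[k+1:]) for k in range(len(l))]
--
-- def helper(s, wordDict, string, visited):
--     # Prefix-pruned recursion over the list of still-available (index, word) pairs: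
--     # each step picks a pair whose word matches the front of the remaining suffix of s
--     # and recurses with the pair removed from the list.  (Does not mutate `visited`.)
--     if not s.startswith(string):
--         return False
--     avail = [(i, wordDict[i]) for i in range(len(wordDict)) if i not in visited]
--
--     def go(rem, avail):
--         if not rem:
--             return True
--         return any(rem.startswith(w) and go(rem[len(w):], rest)
--                    for (i, w), rest in picks(avail))
--
--     return go(s[len(string):], avail)
-- ===== Notes on version B (the rewrite author's own statement) =====
-- stated objective: alternative
-- what changed: A blindly enumerates permutations of unused word indices, checking equality against s only once the built string happens to equal it; B first filters the available (index, word) pairs into a list, then recurses on the remaining suffix of s, at each step picking one pair whose word is a prefix of the suffix and removing it from the list, so non-matching branches are cut immediately.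
import Mathlib
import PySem

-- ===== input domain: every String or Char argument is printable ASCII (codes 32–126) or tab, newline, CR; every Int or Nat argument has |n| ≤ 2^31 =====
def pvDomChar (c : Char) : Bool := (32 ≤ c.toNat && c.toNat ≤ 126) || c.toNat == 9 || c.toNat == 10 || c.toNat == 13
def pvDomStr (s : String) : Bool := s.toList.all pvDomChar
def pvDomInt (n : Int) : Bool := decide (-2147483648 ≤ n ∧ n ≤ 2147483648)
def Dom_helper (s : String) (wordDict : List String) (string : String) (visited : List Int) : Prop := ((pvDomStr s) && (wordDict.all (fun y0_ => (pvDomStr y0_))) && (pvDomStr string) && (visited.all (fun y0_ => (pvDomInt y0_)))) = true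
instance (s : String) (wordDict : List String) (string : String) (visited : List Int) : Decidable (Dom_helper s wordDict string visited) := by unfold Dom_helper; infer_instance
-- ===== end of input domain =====

-- B replaces A's blind permutation search (visited-set backtracking over all word indices)
-- by a prefix-pruned recursion over the list of still-available (index, word) pairs.
-- The equivalence is about the RETURN value only: Python A mutates `visited` in place
-- (net additions on a successful path), B does not.

-- ===== PORT A =====
-- Termination measure of the Python recursion: number of word indices not yet visited.
def pvUnused (N : Nat) (vis : List Int) : Nat :=
  (List.range N).countP (fun i : Nat => !decide ((i : Int) ∈ vis))

-- countP is strictly monotone when the weaker predicate loses a member (used for termination).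
theorem pv_countP_lt {α : Type} (l : List α) (p q : α → Bool)
    (himp : ∀ a, q a = true → p a = true) (x : α) (hx : x ∈ l)
    (hp : p x = true) (hq : q x = false) : l.countP q < l.countP p := by
  induction l with
  | nil => cases hx
  | cons y t ih =>
    have hmono : t.countP q ≤ t.countP p := by
      apply List.countP_mono_left
      intro a _ ha; exact himp a ha
    rcases List.mem_cons.mp hx with rfl | hxt
    · simp [hp, hq]
      omega
    · have := ih hxt
      by_cases hqy : q y = true
      · simp only [List.countP_cons, hqy, himp y hqy, if_true]; omega
      · rw [Bool.not_eq_true] at hqy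
        simp only [List.countP_cons, hqy, Bool.false_eq_true, if_false]
        by_cases hpy : p y = true
        · simp only [hpy, if_true]; omega
        · rw [Bool.not_eq_true] at hpy
          simp only [hpy, Bool.false_eq_true, if_false]; omega

theorem pvUnused_lt (N : Nat) (i : Nat) (vis : List Int) (hiN : i < N)
    (hvi : (i : Int) ∉ vis) :
    pvUnused N (PySem.Set.add vis (i : Int)) < pvUnused N vis := by
  have hadd : PySem.Set.add vis (i : Int) = vis ++ [(i : Int)] := by
    simp [PySem.Set.add, hvi]
  rw [pvUnused, pvUnused, hadd]
  apply pv_countP_lt (List.range N)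
    (fun j : Nat => !decide ((j : Int) ∈ vis))
    (fun j : Nat => !decide ((j : Int) ∈ vis ++ [(i : Int)]))
    (by intro a ha; simp at ha ⊢; tauto)
    i (List.mem_range.mpr hiN)
  · simp [hvi]
  · simp

-- A, char-level (helper below wraps the String arguments): the `for i in range(len(wordDict))`
-- loop with early `return True` is `any` over the index range; `wordDict[i]` has i < len, so
-- getD is exact; `visited.add(i)`/`.remove(i)` backtracking means each iteration starts from
-- the same `vis`, so passing `vis` unchanged to every iteration is exact for the return value.
def helperA (s : List Char) (wd : List (List Char)) (str : List Char) (vis : List Int) : Bool :=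
  if str = s then true
  else (List.range wd.length).attach.any (fun ⟨i, hi⟩ =>
    if h : (i : Int) ∈ vis then false
    else helperA s wd (str ++ wd.getD i []) (PySem.Set.add vis (i : Int)))
termination_by pvUnused wd.length vis
decreasing_by exact pvUnused_lt wd.length i vis (List.mem_range.mp hi) h

def helper (s : String) (wordDict : List String) (string : String) (visited : List Int) : Bool :=
  helperA s.toList (wordDict.map String.toList) string.toList visited

-- ===== PORT B =====
-- picks(l) = [(l[k], l[:k]+l[k+1:]) for k in range(len(l))], transcribed structurally.
def pvPicks {α : Type} : List α → List (α × List α)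
  | [] => []
  | x :: xs => (x, xs) :: (pvPicks xs).map (fun p => (p.1, x :: p.2))

-- each pick's rest is one element shorter (used for termination of goB)
theorem pvPicks_len {α : Type} : ∀ {l : List α} {p : α × List α},
    p ∈ pvPicks l → p.2.length + 1 = l.length := by
  intro l
  induction l with
  | nil => intro p hp; cases hp
  | cons x xs ih =>
    intro p hp
    rcases List.mem_cons.mp hp with rfl | hp
    · rfl
    · obtain ⟨q, hq, rfl⟩ := List.mem_map.mp hp
      have := ih hq
      simp only [List.length_cons]
      omega

-- B's inner `go`: `any(... for (i, w), rest in picks(avail))` with the generator's early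
-- exit is `any` over pvPicks; `rem[len(w):]` is the PySem slice.
def goB (rem : List Char) (avail : List (Int × List Char)) : Bool :=
  if rem = [] then true
  else (pvPicks avail).attach.any (fun q =>
    PySem.Chars.startswith rem q.1.1.2 &&
      goB (PySem.List.slice rem (some ((q.1.1.2.length : Nat) : Int)) none) q.1.2)
termination_by avail.length
decreasing_by have := pvPicks_len q.2; omega

-- `[(i, wordDict[i]) for i in range(len(wordDict)) if i not in visited]`
def pvAvail (wd : List (List Char)) (vis : List Int) : List (Int × List Char) :=
  ((List.range wd.length).filter (fun i : Nat => !decide ((i : Int) ∈ vis))).map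
    (fun i : Nat => ((i : Int), wd.getD i []))

def helper_alt (s : String) (wordDict : List String) (string : String) (visited : List Int) : Bool :=
  if PySem.Chars.startswith s.toList string.toList then
    goB (PySem.List.slice s.toList (some ((string.toList.length : Nat) : Int)) none)
        (pvAvail (wordDict.map String.toList) visited)
  else false

-- ===== PRECONDITION & SPEC =====
def Spec_helper (s : String) (wordDict : List String) (string : String) (visited : List Int) (out : Bool) : Prop := out = helper_alt s wordDict string visited
instance (s : String) (wordDict : List String) (string : String) (visited : List Int) (out : Bool) : Decidable (Spec_helper s wordDict string visited out) := by unfold Spec_helper; infer_instance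

-- ===== CLAIM (what is proved, stated in full; the proofs are below) =====
def Claim_equal_helper : Prop := ∀ (s : String) (wordDict : List String) (string : String) (visited : List Int), Dom_helper s wordDict string visited → Spec_helper s wordDict string visited (helper s wordDict string visited)

-- ===== LEMMAS AND PROOFS =====

-- attach is transparent for any
theorem pv_any_attach {α : Type} (l : List α) (f : α → Bool) :
    (l.attach.any fun q => f q.1) = l.any f := by
  rw [Bool.eq_iff_iff]
  simp [List.any_eq_true]

-- on a duplicate-free list, picks pairs each element with the list minus it
theorem pvPicks_eq_map :
    ∀ (l : List (Int × List Char)), l.Nodup → pvPicks l = l.map (fun a => (a, l.erase a)) := by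
  intro l
  induction l with
  | nil => intro _; rfl
  | cons x xs ih =>
    intro hnd
    have hx : x ∉ xs := (List.nodup_cons.mp hnd).1
    have hxs : xs.Nodup := (List.nodup_cons.mp hnd).2
    rw [pvPicks, ih hxs, List.map_map, List.map_cons, List.erase_cons_head]
    congr 1
    apply List.map_congr_left
    intro a ha
    have hax : x ≠ a := fun h => hx (h ▸ ha)
    simp [List.erase_cons_tail, hax]

-- helperA, with the guarded any over all indices turned into an any over the filtered list
theorem helperA_unfold (s : List Char) (wd : List (List Char)) (str : List Char) (vis : List Int) :
    helperA s wd str vis = if str = s then true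
      else ((List.range wd.length).filter (fun i : Nat => !decide ((i : Int) ∈ vis))).any
        (fun i => helperA s wd (str ++ wd.getD i []) (PySem.Set.add vis (i : Int))) := by
  rw [helperA]
  by_cases heq : str = s
  · rw [if_pos heq, if_pos heq]
  · rw [if_neg heq, if_neg heq, Bool.eq_iff_iff]
    simp only [List.any_eq_true, List.mem_attach, true_and, List.mem_filter, Subtype.exists,
      List.mem_range]
    constructor
    · rintro ⟨i, hi, hf⟩
      by_cases hm : (i : Int) ∈ vis
      · rw [dif_pos hm] at hf; cases hf
      · rw [dif_neg hm] at hf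
        exact ⟨i, ⟨hi, by simp [hm]⟩, hf⟩
    · rintro ⟨i, ⟨hi, hm⟩, hf⟩
      simp only [Bool.not_eq_eq_eq_not, Bool.not_true, decide_eq_false_iff_not] at hm
      exact ⟨i, hi, by rw [dif_neg hm]; exact hf⟩

-- goB, with attach removed
theorem goB_unfold (rem : List Char) (avail : List (Int × List Char)) :
    goB rem avail = if rem = [] then true
      else (pvPicks avail).any (fun p =>
        PySem.Chars.startswith rem p.1.2 &&
          goB (PySem.List.slice rem (some ((p.1.2.length : Nat) : Int)) none) p.2) := by
  rw [goB]
  by_cases h : rem = []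
  · rw [if_pos h, if_pos h]
  · rw [if_neg h, if_neg h]
    exact pv_any_attach (pvPicks avail) (fun p =>
      PySem.Chars.startswith rem p.1.2 &&
        goB (PySem.List.slice rem (some ((p.1.2.length : Nat) : Int)) none) p.2)

theorem pvAvail_nodup (wd : List (List Char)) (vis : List Int) : (pvAvail wd vis).Nodup := by
  apply List.Nodup.map
  · intro a b hab
    have : (a : Int) = (b : Int) := congrArg Prod.fst hab
    exact_mod_cast this
  · exact (List.nodup_range).filter _

-- removing a chosen pair from the available list = marking its index visited
theorem pvAvail_erase (wd : List (List Char)) (vis : List Int) (i : Nat)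
    (hin : i < wd.length) (hvi : (i : Int) ∉ vis) :
    (pvAvail wd vis).erase ((i : Int), wd.getD i []) =
      pvAvail wd (PySem.Set.add vis (i : Int)) := by
  have hadd : PySem.Set.add vis (i : Int) = vis ++ [(i : Int)] := by
    simp [PySem.Set.add, hvi]
  have hinj : Function.Injective (fun j : Nat => ((j : Int), wd.getD j [])) := by
    intro a b hab
    have : (a : Int) = (b : Int) := congrArg Prod.fst hab
    exact_mod_cast this
  rw [pvAvail, ← List.map_erase hinj, pvAvail, hadd]
  congr 1
  have hnd : ((List.range wd.length).filter (fun j : Nat => !decide ((j : Int) ∈ vis))).Nodup :=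
    (List.nodup_range).filter _
  rw [hnd.erase_eq_filter, List.filter_filter]
  apply List.filter_congr
  intro j _
  simp only [List.mem_append, List.mem_singleton]
  by_cases hji : j = i
  · subst hji; simp
  · have : (j : Int) ≠ (i : Int) := by exact_mod_cast hji
    simp [this, hji]

-- the any over available pairs (each with the list minus it) is the any over free indices
theorem pv_any_avail (wd : List (List Char)) (vis : List Int)
    (F : Int × List Char → List (Int × List Char) → Bool) :
    ((pvAvail wd vis).any (fun a => F a ((pvAvail wd vis).erase a)))
      = ((List.range wd.length).filter (fun i : Nat => !decide ((i : Int) ∈ vis))).any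
          (fun i => F ((i : Int), wd.getD i []) (pvAvail wd (PySem.Set.add vis (i : Int)))) := by
  have e : pvAvail wd vis
      = ((List.range wd.length).filter (fun i : Nat => !decide ((i : Int) ∈ vis))).map
          (fun i : Nat => ((i : Int), wd.getD i [])) := rfl
  rw [e, List.any_map]
  apply PySem.List.any_congr_mem
  intro i hiF
  have hi : i < wd.length := List.mem_range.mp (List.mem_filter.mp hiF).1
  have hmem : (i : Int) ∉ vis := by
    have := (List.mem_filter.mp hiF).2
    simpa using this
  simp only [Function.comp]
  rw [← e, pvAvail_erase wd vis i hi hmem]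

-- If the built text is not a prefix of s, A can never reach s: every branch fails.
theorem helperA_false (s : List Char) (wd : List (List Char)) :
    ∀ n str vis, pvUnused wd.length vis ≤ n → ¬ str <+: s →
      helperA s wd str vis = false := by
  intro n
  induction n using Nat.strong_induction_on with
  | _ n ih =>
    intro str vis hμ hpre
    rw [helperA]
    have hne : str ≠ s := fun h => hpre (h ▸ List.prefix_refl s)
    rw [if_neg hne]
    simp only [List.any_eq_false]
    rintro ⟨i, hi⟩ -
    by_cases hmem : (i : Int) ∈ vis
    · simp [hmem]
    · simp only [dif_neg hmem, Bool.not_eq_true]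
      have hlt := pvUnused_lt wd.length i vis (List.mem_range.mp hi) hmem
      exact ih (pvUnused wd.length (PySem.Set.add vis (i : Int)))
        (Nat.lt_of_lt_of_le hlt hμ) _ _ (Nat.le_refl _)
        (fun hp => hpre ((List.prefix_append str _).trans hp))

-- Main invariant: when the built text IS a prefix of s, A's backtracking search from `str`
-- equals B's search on the remaining suffix of s with the corresponding available list.
theorem helperA_eq (s : List Char) (wd : List (List Char)) :
    ∀ n str vis, pvUnused wd.length vis ≤ n → str <+: s →
      helperA s wd str vis = goB (s.drop str.length) (pvAvail wd vis) := by
  intro n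
  induction n using Nat.strong_induction_on with
  | _ n ih =>
    intro str vis hμ hpre
    obtain ⟨rem, hrem⟩ := hpre
    have hdrop : s.drop str.length = rem := by rw [← hrem]; exact List.drop_left
    rw [helperA_unfold, goB_unfold, hdrop]
    by_cases heq : str = s
    · have hnil : rem = [] := by
        apply List.append_cancel_left (as := str)
        rw [hrem, List.append_nil, heq]
      rw [if_pos heq, if_pos hnil]
    · have hremne : rem ≠ [] := by rintro rfl; exact heq (by simpa using hrem)
      rw [if_neg heq, if_neg hremne]
      rw [pvPicks_eq_map _ (pvAvail_nodup wd vis), List.any_map]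
      simp only [Function.comp_def]
      refine Eq.trans ?_ (pv_any_avail wd vis (fun a rest =>
        PySem.Chars.startswith rem a.2 &&
          goB (PySem.List.slice rem (some ((a.2.length : Nat) : Int)) none) rest)).symm
      apply PySem.List.any_congr_mem
      intro i hiF
      have hi : i < wd.length := List.mem_range.mp (List.mem_filter.mp hiF).1
      have hmem : (i : Int) ∉ vis := by
        have := (List.mem_filter.mp hiF).2
        simpa using this
      by_cases hsw : wd.getD i [] <+: rem
      · have hb : PySem.Chars.startswith rem (wd.getD i []) = true :=
          (PySem.Chars.startswith_iff _ _).mpr hsw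
        rw [hb, Bool.true_and]
        have hlt := pvUnused_lt wd.length i vis hi hmem
        have hp2 : str ++ wd.getD i [] <+: s := by
          rw [← hrem]; exact (List.prefix_append_right_inj str).mpr hsw
        rw [ih (pvUnused wd.length (PySem.Set.add vis (i : Int)))
          (Nat.lt_of_lt_of_le hlt hμ) _ _ (Nat.le_refl _) hp2]
        have hdd : s.drop (str ++ wd.getD i []).length = rem.drop (wd.getD i []).length := by
          rw [← hrem, List.length_append, ← List.drop_drop, List.drop_left]
        rw [hdd, PySem.List.slice_from_natCast]
      · have hb : PySem.Chars.startswith rem (wd.getD i []) = false := by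
          rw [← Bool.not_eq_true]
          exact fun h => hsw ((PySem.Chars.startswith_iff _ _).mp h)
        rw [hb, Bool.false_and]
        apply helperA_false s wd (pvUnused wd.length (PySem.Set.add vis (i : Int))) _ _
          (Nat.le_refl _)
        intro hp
        rw [← hrem] at hp
        exact hsw ((List.prefix_append_right_inj str).mp hp)

-- ===== VERDICT (by name: the statement is the Claim_ definition above) =====
theorem helper_spec : Claim_equal_helper := by
  intro s wordDict string visited _
  unfold Spec_helper helper helper_alt
  by_cases hp : string.toList <+: s.toList
  · have hb : PySem.Chars.startswith s.toList string.toList = true :=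
      (PySem.Chars.startswith_iff _ _).mpr hp
    rw [hb, if_pos rfl, PySem.List.slice_from_natCast]
    exact helperA_eq s.toList (wordDict.map String.toList)
      (pvUnused (wordDict.map String.toList).length visited) _ _ (Nat.le_refl _) hp
  · have hb : PySem.Chars.startswith s.toList string.toList = false := by
      rw [← Bool.not_eq_true]
      exact fun h => hp ((PySem.Chars.startswith_iff _ _).mp h)
    rw [hb]
    simp only [Bool.false_eq_true, if_false]
    exact helperA_false s.toList (wordDict.map String.toList)
      (pvUnused (wordDict.map String.toList).length visited) _ _ (Nat.le_refl _) hp
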